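-- pv_equiv track=rewrite | github.com/DavidAilesChen/FlippedRAG | rag/bert_ranker_utils.py | accumulate_list_by_qid_2_dic
-- ===== SOURCE A (Python) =====
-- def accumulate_list_by_qid_2_dic(l, qid_list):
--     """
--     IN:[], []
--     out:{QID: ITEM}
--     """
--     accum_dict = {}
--     for item, qid in zip(l, qid_list):
--         if qid not in accum_dict:
--             accum_dict[qid] = item[0]
--         else:
--             if item[0] != accum_dict[qid]:
--                 raise KeyError("Different")
--     return accum_dict
-- ===== SOURCE B (Python) =====
-- def accumulate_list_by_qid_2_dic(l, qid_list):
--     # collect-then-validate: group all first elements per qid, then check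
--     # consistency, then build the {qid: first value} dict.
--     groups = {}
--     for item, qid in zip(l, qid_list):
--         groups.setdefault(qid, []).append(item[0])
--     for values in groups.values():
--         first = values[0]
--         for v in values[1:]:
--             if v != first:
--                 raise KeyError("Different")
--     return {qid: values[0] for qid, values in groups.items()}
-- ===== Notes on version B (the rewrite author's own statement) =====
-- stated objective: alternative
-- what changed: Replaces the interleaved check-while-inserting loop by a collect-then-validate shape: one pass groups every item[0] per qid into lists, a second pass validates each group is constant (raising KeyError('Different') otherwise), and a final comprehension maps each qid to its first value.
import Mathlib
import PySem

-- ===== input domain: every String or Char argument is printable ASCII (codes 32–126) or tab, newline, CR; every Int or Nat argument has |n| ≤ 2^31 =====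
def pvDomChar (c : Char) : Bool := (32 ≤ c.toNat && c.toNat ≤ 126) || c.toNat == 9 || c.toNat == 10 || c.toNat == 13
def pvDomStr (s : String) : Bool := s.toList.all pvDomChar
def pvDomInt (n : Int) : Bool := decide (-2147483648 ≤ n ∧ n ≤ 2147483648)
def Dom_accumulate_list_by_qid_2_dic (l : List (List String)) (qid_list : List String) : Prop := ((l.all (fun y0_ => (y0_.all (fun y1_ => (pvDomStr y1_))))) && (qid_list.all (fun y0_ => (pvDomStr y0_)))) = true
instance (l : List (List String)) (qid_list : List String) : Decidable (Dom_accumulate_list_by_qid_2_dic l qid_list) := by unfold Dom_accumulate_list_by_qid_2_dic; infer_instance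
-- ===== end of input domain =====

-- B replaces A's check-while-inserting dict loop by collect (group all item[0] per qid),
-- then validate each group, then build {qid: first value} — an alternative decomposition, same cost.
-- Both raise (KeyError/IndexError) outside Pre_; there the Lean ports return [] via the Option helpers.

-- ===== PORT A =====
-- A's loop; 'none' = the explicit raise KeyError("Different") or IndexError from item[0].
def aLoop : List (List String × String) → PySem.Dict String String → Option (PySem.Dict String String)
  | [], d => some d
  | (item, qid) :: rest, d =>
    if d.contains qid = false then
      match PySem.List.pyGet? item 0 with
      | none => none
      | some v => aLoop rest (d.insert qid v)
    else
      match PySem.List.pyGet? item 0 with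
      | none => none
      | some v => if v ≠ d.getD qid "" then none else aLoop rest d

def accumulate_list_by_qid_2_dic (l : List (List String)) (qid_list : List String) : List (String × String) :=
  match aLoop (l.zip qid_list) PySem.Dict.empty with
  | none => []
  | some d => d.items

-- ===== PORT B =====
-- pass 1: groups.setdefault(qid, []).append(item[0])
def bGroups : List (List String × String) → PySem.Dict String (List String) → Option (PySem.Dict String (List String))
  | [], g => some g
  | (item, qid) :: rest, g =>
    match PySem.List.pyGet? item 0 with
    | none => none
    | some v => bGroups rest (g.modify qid [] (· ++ [v]))

-- pass 2: every element of values[1:] must equal values[0]; 'none' = raise KeyError("Different")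
def bValid : List (String × List String) → Option Unit
  | [] => some ()
  | (_, vs) :: rest =>
    match PySem.List.pyGet? vs 0 with
    | none => none
    | some first => if (PySem.List.slice vs (some 1) none).all (· == first) then bValid rest else none

-- pass 3: {qid: values[0] for qid, values in groups.items()}
def bBuild : List (String × List String) → Option (List (String × String))
  | [] => some []
  | (q, vs) :: rest =>
    match PySem.List.pyGet? vs 0 with
    | none => none
    | some first => (bBuild rest).map (fun r => (q, first) :: r)

def accumulate_list_by_qid_2_dic_alt (l : List (List String)) (qid_list : List String) : List (String × String) :=
  match bGroups (l.zip qid_list) PySem.Dict.empty with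
  | none => []
  | some g =>
    match bValid g.items with
    | none => []
    | some _ => (bBuild g.items).getD []

-- ===== PRECONDITION & SPEC =====
-- Exactly the inputs where A returns: every zipped item is nonempty (no IndexError) and
-- items sharing a qid share their first element (no KeyError("Different")).
def Pre_accumulate_list_by_qid_2_dic (l : List (List String)) (qid_list : List String) : Prop :=
  (∀ p ∈ l.zip qid_list, p.1 ≠ []) ∧
  (l.zip qid_list).Pairwise (fun p q => p.2 = q.2 → p.1.head? = q.1.head?)
instance (l : List (List String)) (qid_list : List String) : Decidable (Pre_accumulate_list_by_qid_2_dic l qid_list) := by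
  unfold Pre_accumulate_list_by_qid_2_dic; infer_instance

def pvWitness_accumulate_list_by_qid_2_dic : List (List String) × List String :=
  ([["a", "x"], ["a"], ["b"]], ["q1", "q1", "q2"])

def Spec_accumulate_list_by_qid_2_dic (l : List (List String)) (qid_list : List String) (out : List (String × String)) : Prop := out = accumulate_list_by_qid_2_dic_alt l qid_list
instance (l : List (List String)) (qid_list : List String) (out : List (String × String)) : Decidable (Spec_accumulate_list_by_qid_2_dic l qid_list out) := by unfold Spec_accumulate_list_by_qid_2_dic; infer_instance

-- ===== CLAIM (what is proved, stated in full; the proofs are below) =====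
def Claim_equal_accumulate_list_by_qid_2_dic : Prop := ∀ (l : List (List String)) (qid_list : List String), Dom_accumulate_list_by_qid_2_dic l qid_list → Pre_accumulate_list_by_qid_2_dic l qid_list → Spec_accumulate_list_by_qid_2_dic l qid_list (accumulate_list_by_qid_2_dic l qid_list)

-- ===== LEMMAS AND PROOFS =====

-- coupling invariant between A's dict d and B's groups dict g
def pvRel (d : PySem.Dict String String) (g : PySem.Dict String (List String)) : Prop :=
  d.items = g.items.map (fun p => (p.1, p.2.headD "")) ∧
  (∀ p ∈ g.items, p.2 ≠ [] ∧ ∀ v ∈ p.2, v = p.2.headD "") ∧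
  (g.items.map (·.1)).Nodup

-- general helper: find? success mirrors any
theorem pvFind?_isSome_any {α : Type} (p : α → Bool) (l : List α) : (l.find? p).isSome = l.any p := by
  induction l with
  | nil => rfl
  | cons x t ih => by_cases h : p x <;> simp [h, ih]

theorem pvContains_eq_isSome {κ ν : Type} [BEq κ] (d : PySem.Dict κ ν) (k : κ) :
    d.contains k = (d.get? k).isSome := by
  simp [PySem.Dict.contains, PySem.Dict.get?, ← pvFind?_isSome_any]

-- lookups in A's dict are headD-images of lookups in B's groups dict
theorem pvGet?_coupling (d : PySem.Dict String String) (g : PySem.Dict String (List String))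
    (h : d.items = g.items.map (fun p => (p.1, p.2.headD ""))) (k : String) :
    d.get? k = (g.get? k).map (fun vs => vs.headD "") := by
  simp only [PySem.Dict.get?, h, List.find?_map]
  have he : ((fun p : String × String => p.1 == k) ∘ fun p : String × List String => (p.1, p.2.headD "")) =
      fun p : String × List String => p.1 == k := rfl
  rw [he, Option.map_map, Option.map_map]
  rfl

-- with nodup keys, find? at a member's key returns that member
theorem pvFind?_of_mem_nodup {ν : Type} (items : List (String × ν))
    (hnd : (items.map (·.1)).Nodup) (p : String × ν) (hp : p ∈ items) :
    items.find? (·.1 == p.1) = some p := by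
  induction items with
  | nil => cases hp
  | cons q t ih =>
    simp only [List.map_cons, List.nodup_cons] at hnd
    rcases List.mem_cons.mp hp with h | h
    · subst h; exact List.find?_cons_of_pos (by simp)
    · have hne : ¬ (q.1 == p.1) = true := by
        intro hx
        exact hnd.1 (eq_of_beq hx ▸ List.mem_map_of_mem h)
      have hstep := List.find?_cons_of_neg (l := t) (a := q)
        (p := fun x : String × ν => x.1 == p.1) hne
      rw [hstep, ih hnd.2 h]

theorem pvGet?_of_mem_nodup {ν : Type} (g : PySem.Dict String ν)
    (hnd : (g.items.map (·.1)).Nodup) (p : String × ν) (hp : p ∈ g.items) :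
    g.get? p.1 = some p.2 := by
  simp [PySem.Dict.get?, pvFind?_of_mem_nodup g.items hnd p hp]

theorem main_lemma : ∀ (z : List (List String × String)) (d : PySem.Dict String String)
    (g : PySem.Dict String (List String)),
    (∀ p ∈ z, p.1 ≠ []) →
    z.Pairwise (fun p q => p.2 = q.2 → p.1.head? = q.1.head?) →
    (∀ p ∈ z, ∀ v, d.get? p.2 = some v → p.1.head? = some v) →
    pvRel d g →
    ∃ d' g', aLoop z d = some d' ∧ bGroups z g = some g' ∧ pvRel d' g' := by
  intro z
  induction z with
  | nil => intro d g _ _ _ hrel; exact ⟨d, g, rfl, rfl, hrel⟩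
  | cons hd rest ih =>
    obtain ⟨item, qid⟩ := hd
    intro d g h1 h2 h3 hrel
    obtain ⟨hcouple, hgood, hnd⟩ := hrel
    obtain ⟨a, t, rfl⟩ : ∃ a t, item = a :: t := by
      cases item with
      | nil => exact absurd rfl (h1 _ List.mem_cons_self)
      | cons a t => exact ⟨a, t, rfl⟩
    have hget0 : PySem.List.pyGet? (a :: t) (0 : Int) = some a := by simp [PySem.List.pyGet?, PySem.List.pyIdx?]
    have hgetc : ∀ k, d.get? k = (g.get? k).map (fun vs => vs.headD "") :=
      pvGet?_coupling d g hcouple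
    have hcont : d.contains qid = g.contains qid := by
      rw [pvContains_eq_isSome, pvContains_eq_isSome, hgetc]
      cases g.get? qid <;> rfl
    have h2hd := (List.pairwise_cons.mp h2).1
    have h2' := (List.pairwise_cons.mp h2).2
    have h1' : ∀ p ∈ rest, p.1 ≠ [] := fun p hp => h1 p (List.mem_cons_of_mem _ hp)
    by_cases hc : d.contains qid = true
    · -- A: key present, value matches, d unchanged; B: append a to the existing group
      have hds : (d.get? qid).isSome := by rw [← pvContains_eq_isSome]; exact hc
      obtain ⟨v0, hv0⟩ := Option.isSome_iff_exists.mp hds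
      have hhead : (a :: t).head? = some v0 := h3 _ List.mem_cons_self v0 hv0
      have hav0 : a = v0 := by simpa using hhead
      obtain ⟨vs, hvs⟩ : ∃ vs, g.get? qid = some vs := by
        have hx := hgetc qid
        rw [hv0] at hx
        cases hqs : g.get? qid with
        | none => rw [hqs] at hx; simp at hx
        | some vs => exact ⟨vs, rfl⟩
      have hv0vs : v0 = vs.headD "" := by
        have hx := hgetc qid; rw [hv0, hvs] at hx; simpa using hx
      -- the entry behind hvs is a member with key qid
      obtain ⟨pv, hfind, hpv2⟩ : ∃ pv, g.items.find? (·.1 == qid) = some pv ∧ pv.2 = vs := by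
        simp only [PySem.Dict.get?] at hvs
        cases hf : g.items.find? (·.1 == qid) with
        | none => rw [hf] at hvs; simp at hvs
        | some pv => rw [hf] at hvs; exact ⟨pv, rfl, by simpa using hvs⟩
      have hpvmem : pv ∈ g.items := List.mem_of_find?_eq_some hfind
      have hpv1 : pv.1 = qid := by
        have hx := List.find?_some hfind
        simpa using hx
      have hvsgood := hgood pv hpvmem
      have hvsne : vs ≠ [] := hpv2 ▸ hvsgood.1
      have hvsall : ∀ v ∈ vs, v = vs.headD "" := hpv2 ▸ hvsgood.2
      have hmemvs : ∀ p ∈ g.items, p.1 = qid → p.2 = vs := by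
        intro p hp hpq
        have hx := pvGet?_of_mem_nodup g hnd p hp
        rw [hpq, hvs] at hx
        simpa using hx.symm
      have hAstep : aLoop ((a :: t, qid) :: rest) d = aLoop rest d := by
        simp [aLoop, hc, PySem.Dict.getD, hv0, ← hav0]
      have hgc : g.contains qid = true := hcont ▸ hc
      have hBstep : bGroups ((a :: t, qid) :: rest) g =
          bGroups rest (g.modify qid [] (· ++ [a])) := by
        simp [bGroups]
      have hBg : (g.modify qid [] (· ++ [a])).items =
          g.items.map (fun p => if p.1 == qid then (qid, vs ++ [a]) else p) := by
        simp [PySem.Dict.modify, PySem.Dict.insert, hgc, PySem.Dict.getD, hvs]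
      -- headD is unchanged by the append
      have hheadD : (vs ++ [a]).headD "" = vs.headD "" := by
        cases vs with
        | nil => exact absurd rfl hvsne
        | cons x t' => rfl
      have hrel' : pvRel d (g.modify qid [] (· ++ [a])) := by
        refine ⟨?_, ?_, ?_⟩
        · rw [hBg, List.map_map, hcouple]
          refine List.map_congr_left ?_
          intro p hp
          by_cases hpq : (p.1 == qid) = true
          · have hq := eq_of_beq hpq
            have hv := hmemvs p hp hq
            obtain ⟨x, t'', hvseq⟩ : ∃ x t'', vs = x :: t'' := by
              cases vs with
              | nil => exact absurd rfl hvsne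
              | cons x t'' => exact ⟨x, t'', rfl⟩
            subst hvseq
            simp [Function.comp, hq, hv]
          · simp [Function.comp, hpq]
        · rw [hBg]
          intro p' hp'
          obtain ⟨p, hp, rfl⟩ := List.mem_map.mp hp'
          by_cases hpq : (p.1 == qid) = true
          · have hv := hmemvs p hp (eq_of_beq hpq)
            refine ⟨by simp [hpq], ?_⟩
            intro v hv'
            simp only [hpq, if_pos] at hv' ⊢
            rw [hheadD]
            rcases List.mem_append.mp hv' with h | h
            · exact hvsall v h
            · simp only [List.mem_singleton] at h
              rw [h, hav0, hv0vs]
          · simp only [hpq, if_neg, Bool.false_eq_true, not_false_iff] at hp' ⊢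
            exact hgood p hp
        · rw [hBg, List.map_map]
          have : (((·.1) : String × List String → String) ∘
              fun p => if p.1 == qid then (qid, vs ++ [a]) else p) = (·.1) := by
            funext p
            by_cases hpq : (p.1 == qid) = true
            · simp [Function.comp, eq_of_beq hpq]
            · simp [Function.comp, hpq]
          rw [this]; exact hnd
      obtain ⟨d', g', ha, hb, hr⟩ := ih d (g.modify qid [] (· ++ [a])) h1' h2'
        (fun p hp v hv => h3 p (List.mem_cons_of_mem _ hp) v hv) hrel'
      exact ⟨d', g', hAstep ▸ ha, hBstep ▸ hb, hr⟩
    · -- new key: both sides append a fresh entry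
      have hcf : d.contains qid = false := by simpa using hc
      have hgc : g.contains qid = false := hcont ▸ hcf
      have hgnone : g.get? qid = none := by
        have := pvContains_eq_isSome g qid
        rw [hgc] at this
        cases h : g.get? qid with
        | none => rfl
        | some v => rw [h] at this; simp at this
      have hAstep : aLoop ((a :: t, qid) :: rest) d = aLoop rest (d.insert qid a) := by
        simp [aLoop, hcf]
      have hBstep : bGroups ((a :: t, qid) :: rest) g =
          bGroups rest (g.modify qid [] (· ++ [a])) := by
        simp [bGroups]
      have hdins : (d.insert qid a).items = d.items ++ [(qid, a)] := by
        simp [PySem.Dict.insert, hcf]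
      have hgins : (g.modify qid [] (· ++ [a])).items = g.items ++ [(qid, [a])] := by
        simp [PySem.Dict.modify, PySem.Dict.insert, hgc, PySem.Dict.getD, hgnone]
      have hknotin : qid ∉ g.items.map (·.1) := by
        intro hmem
        obtain ⟨p, hp, hpq⟩ := List.mem_map.mp hmem
        have : g.items.any (fun p => p.1 == qid) = true :=
          List.any_eq_true.mpr ⟨p, hp, by simp [hpq]⟩
        rw [show g.items.any (fun p => p.1 == qid) = g.contains qid from rfl, hgc] at this
        simp at this
      have hrel' : pvRel (d.insert qid a) (g.modify qid [] (· ++ [a])) := by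
        refine ⟨?_, ?_, ?_⟩
        · rw [hdins, hgins, List.map_append, hcouple]; rfl
        · rw [hgins]
          intro p hp
          rcases List.mem_append.mp hp with h | h
          · exact hgood p h
          · simp only [List.mem_singleton] at h
            subst h
            exact ⟨by simp, by intro v hv; simpa using hv⟩
        · rw [hgins, List.map_append]
          simp only [List.map_cons, List.map_nil]
          rw [List.nodup_append]
          refine ⟨hnd, List.nodup_singleton _, ?_⟩
          intro x hx y hy hxy
          have hyq : y = qid := by simpa using hy
          exact hknotin (hyq ▸ hxy ▸ hx)
      have h3' : ∀ p ∈ rest, ∀ v, (d.insert qid a).get? p.2 = some v → p.1.head? = some v := by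
        intro p hp v hv
        by_cases hpq : p.2 = qid
        · rw [hpq, PySem.Dict.get?_insert_self] at hv
          have hva : v = a := by simpa using hv.symm
          rw [hva]
          exact (h2hd p hp hpq.symm).symm
        · rw [PySem.Dict.get?_insert_of_ne _ _ hpq] at hv
          exact h3 p (List.mem_cons_of_mem _ hp) v hv
      obtain ⟨d', g', ha, hb, hr⟩ := ih (d.insert qid a) (g.modify qid [] (· ++ [a])) h1' h2' h3' hrel'
      exact ⟨d', g', hAstep ▸ ha, hBstep ▸ hb, hr⟩

theorem pvValid_of_good : ∀ gs : List (String × List String),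
    (∀ p ∈ gs, p.2 ≠ [] ∧ ∀ v ∈ p.2, v = p.2.headD "") → bValid gs = some () := by
  intro gs
  induction gs with
  | nil => intro _; rfl
  | cons p rest ih =>
    intro h
    obtain ⟨q, vs⟩ := p
    obtain ⟨hne, hall⟩ := h _ List.mem_cons_self
    obtain ⟨x, t', rfl⟩ : ∃ x t', vs = x :: t' := by
      cases vs with
      | nil => exact absurd rfl hne
      | cons x t' => exact ⟨x, t', rfl⟩
    have hget0 : PySem.List.pyGet? (x :: t') (0 : Int) = some x := by simp [PySem.List.pyGet?, PySem.List.pyIdx?]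
    have hall' : (PySem.List.slice (x :: t') (some 1) none).all (· == x) = true := by
      rw [PySem.List.slice_from_one]
      exact List.all_eq_true.mpr fun v hv => by
        simpa using hall v (List.mem_cons_of_mem _ hv)
    simp [bValid, hall']
    exact ih fun p hp => h p (List.mem_cons_of_mem _ hp)

theorem pvBuild_of_good : ∀ gs : List (String × List String),
    (∀ p ∈ gs, p.2 ≠ []) →
    bBuild gs = some (gs.map (fun p => (p.1, p.2.headD ""))) := by
  intro gs
  induction gs with
  | nil => intro _; rfl
  | cons p rest ih =>
    intro h
    obtain ⟨q, vs⟩ := p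
    obtain ⟨x, t', rfl⟩ : ∃ x t', vs = x :: t' := by
      cases vs with
      | nil => exact absurd rfl (h _ List.mem_cons_self)
      | cons x t' => exact ⟨x, t', rfl⟩
    have hget0 : PySem.List.pyGet? (x :: t') (0 : Int) = some x := by simp [PySem.List.pyGet?, PySem.List.pyIdx?]
    simp [bBuild, ih fun p hp => h p (List.mem_cons_of_mem _ hp)]

-- ===== VERDICT (by name: the statement is the Claim_ definition above) =====
theorem accumulate_list_by_qid_2_dic_spec : Claim_equal_accumulate_list_by_qid_2_dic := by
  intro l qid_list _ hpre
  obtain ⟨h1, h2⟩ := hpre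
  obtain ⟨d', g', ha, hb, hrel⟩ := main_lemma (l.zip qid_list) PySem.Dict.empty PySem.Dict.empty
    h1 h2 (by intro p _ v hv; simp [PySem.Dict.get?, PySem.Dict.empty] at hv)
    ⟨rfl, by simp [PySem.Dict.empty], by simp [PySem.Dict.empty]⟩
  unfold Spec_accumulate_list_by_qid_2_dic
  unfold accumulate_list_by_qid_2_dic accumulate_list_by_qid_2_dic_alt
  rw [ha, hb]
  simp only [pvValid_of_good g'.items hrel.2.1,
    pvBuild_of_good g'.items fun p hp => (hrel.2.1 p hp).1, Option.getD_some]
  exact hrel.1
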